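-- pv_equiv track=rewrite | github.com/AdamZhouSE/pythonHomework | Code/CodeRecords/2945/60810/300318.py | boy
-- ===== SOURCE A (Python) =====
-- def boy(str):
--     res=0
--     for i in range(len(str)-2):
--         if(str[i:i+3]=="boy"):
--             res+=1
--     str=str.replace("boy","nnn")
--     for i in range(len(str)):
--         if(str[i]=='b' or str[i]=='o' or str[i]=='y'):
--             res+=1
--     return res
-- ===== SOURCE B (Python) =====
-- def boy(str):
--     c = str.count("boy")
--     return str.count("b") + str.count("o") + str.count("y") - 2 * c
-- ===== Notes on version B (the rewrite author's own statement) =====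
-- stated objective: simpler
-- what changed: Replaces A's two index loops plus a replace() pass with a closed-form arithmetic identity: total b/o/y character count minus twice the non-overlapping 'boy' count.
import Mathlib
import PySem

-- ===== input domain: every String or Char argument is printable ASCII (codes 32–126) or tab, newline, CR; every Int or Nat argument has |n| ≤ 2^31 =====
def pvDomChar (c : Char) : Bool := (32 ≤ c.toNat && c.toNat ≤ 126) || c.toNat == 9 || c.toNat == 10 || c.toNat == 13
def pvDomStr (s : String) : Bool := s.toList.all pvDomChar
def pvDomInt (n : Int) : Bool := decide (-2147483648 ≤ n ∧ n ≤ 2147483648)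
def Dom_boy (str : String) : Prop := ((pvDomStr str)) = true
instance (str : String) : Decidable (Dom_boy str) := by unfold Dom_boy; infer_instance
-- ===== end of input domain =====

-- B computes the same result by the arithmetic identity count('b')+count('o')+count('y') - 2*count('boy'),
-- replacing A's two index loops and replace() pass.

-- ===== PORT A =====
def boy (str : String) : Int :=
  let res : Int := (PySem.List.pyRange 0 ((str.length : Int) - 2) 1).foldl
    (fun res i =>
      if PySem.Str.slice str (some i) (some (i + 3)) = "boy" then res + 1 else res) 0
  let str2 := PySem.Str.replace str "boy" "nnn"
  (PySem.List.pyRange 0 (str2.length : Int) 1).foldl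
    (fun res i =>
      if PySem.Str.pyGet? str2 i = some 'b' ∨ PySem.Str.pyGet? str2 i = some 'o' ∨
         PySem.Str.pyGet? str2 i = some 'y' then res + 1 else res) res

-- ===== PORT B =====
def boy_alt (str : String) : Int :=
  let c : Int := (PySem.Str.count str "boy" : Int)
  (PySem.Str.count str "b" : Int) + (PySem.Str.count str "o" : Int)
    + (PySem.Str.count str "y" : Int) - 2 * c

-- ===== PRECONDITION & SPEC =====
def Spec_boy (str : String) (out : Int) : Prop := out = boy_alt str
instance (str : String) (out : Int) : Decidable (Spec_boy str out) := by unfold Spec_boy; infer_instance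

-- ===== CLAIM (what is proved, stated in full; the proofs are below) =====
def Claim_equal_boy : Prop := ∀ (str : String), Dom_boy str → Spec_boy str (boy str)

-- ===== LEMMAS AND PROOFS =====

-- greedy non-overlapping count of "boy" occurrences (proof-side spec function)
def grec : List Char → Nat
  | [] => 0
  | c :: t => if ['b','o','y'].isPrefixOf (c :: t) then grec (t.drop 2) + 1 else grec t
termination_by l => l.length
decreasing_by all_goals simp

-- proof-side spec of str.replace("boy","nnn")
def rrep : List Char → List Char
  | [] => []
  | c :: t => if ['b','o','y'].isPrefixOf (c :: t) then 'n' :: 'n' :: 'n' :: rrep (t.drop 2) else c :: rrep t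
termination_by l => l.length
decreasing_by all_goals simp

theorem countgo_single (c : Char) : ∀ (fuel : Nat) (l : List Char) (acc : Nat),
    l.length ≤ fuel → PySem.Chars.count.go [c] fuel l acc = acc + l.count c := by
  intro fuel
  induction fuel with
  | zero =>
    intro l acc h
    have : l = [] := List.eq_nil_of_length_eq_zero (Nat.le_zero.mp h)
    subst this; simp [PySem.Chars.count.go]
  | succ f ih =>
    intro l acc h
    cases l with
    | nil => simp [PySem.Chars.count.go]
    | cons x t =>
      rw [PySem.Chars.count.go]
      simp only [List.isPrefixOf, Bool.and_true]
      by_cases hx : x = c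
      · subst hx
        simp only [beq_self_eq_true, if_pos]
        rw [ih _ _ (by simpa using Nat.le_of_succ_le_succ h)]
        simp
        omega
      · have hcx : (c == x) = false := beq_eq_false_iff_ne.mpr (fun e => hx e.symm)
        rw [hcx]
        simp only [Bool.false_eq_true, ite_false]
        rw [ih _ _ (by simpa using Nat.le_of_succ_le_succ h)]
        simp [List.count_cons]
        exact hx

theorem countgo_boy : ∀ (fuel : Nat) (l : List Char) (acc : Nat),
    l.length ≤ fuel → PySem.Chars.count.go ['b','o','y'] fuel l acc = acc + grec l := by
  intro fuel
  induction fuel using Nat.strong_induction_on with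
  | _ f ih =>
    intro l acc h
    match f, l with
    | 0, l =>
      have : l = [] := List.eq_nil_of_length_eq_zero (Nat.le_zero.mp h)
      subst this; simp [PySem.Chars.count.go, grec]
    | f + 1, [] => simp [PySem.Chars.count.go, grec]
    | f + 1, x :: t =>
      rw [PySem.Chars.count.go]
      rw [grec]
      by_cases hp : ['b','o','y'].isPrefixOf (x :: t) = true
      · rw [if_pos hp, if_pos hp]
        have hlen : (List.drop (['b','o','y'].length) (x :: t)).length ≤ f := by
          simp at h ⊢; omega
        rw [ih f (Nat.lt_succ_self f) _ _ hlen]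
        have : List.drop (['b','o','y'].length) (x :: t) = t.drop 2 := by simp
        rw [this]; omega
      · rw [if_neg hp, if_neg hp]
        exact ih f (Nat.lt_succ_self f) t acc (by simpa using Nat.le_of_succ_le_succ h)

theorem replacego_boy : ∀ (fuel : Nat) (l : List Char) (acc : List Char),
    l.length ≤ fuel →
    PySem.Chars.replace.go ['b','o','y'] ['n','n','n'] fuel l acc = acc.reverse ++ rrep l := by
  intro fuel
  induction fuel using Nat.strong_induction_on with
  | _ f ih =>
    intro l acc h
    match f, l with
    | 0, l =>
      have : l = [] := List.eq_nil_of_length_eq_zero (Nat.le_zero.mp h)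
      subst this; simp [PySem.Chars.replace.go, rrep]
    | f + 1, [] => simp [PySem.Chars.replace.go, rrep]
    | f + 1, x :: t =>
      rw [PySem.Chars.replace.go]
      rw [rrep]
      by_cases hp : ['b','o','y'].isPrefixOf (x :: t) = true
      · rw [if_pos hp, if_pos hp]
        have hlen : (List.drop (['b','o','y'].length) (x :: t)).length ≤ f := by
          simp at h ⊢; omega
        rw [ih f (Nat.lt_succ_self f) _ _ hlen]
        have : List.drop (['b','o','y'].length) (x :: t) = t.drop 2 := by simp
        rw [this]; simp
      · rw [if_neg hp, if_neg hp]
        rw [ih f (Nat.lt_succ_self f) t _ (by simpa using Nat.le_of_succ_le_succ h)]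
        simp

-- each replaced occurrence removes exactly one 'b', one 'o' and one 'y'
theorem count_rrep (l : List Char) :
    ((rrep l).count 'b' + (rrep l).count 'o' + (rrep l).count 'y' : Int)
      = (l.count 'b' : Int) + l.count 'o' + l.count 'y' - 3 * grec l := by
  induction l using rrep.induct with
  | case1 => simp [rrep, grec]
  | case2 c t hp ih =>
    obtain ⟨rest, hrest⟩ : ∃ rest, c :: t = 'b' :: 'o' :: 'y' :: rest := by
      have := List.isPrefixOf_iff_prefix.mp hp
      obtain ⟨s, hs⟩ := this
      exact ⟨s, hs.symm⟩
    have hc : c = 'b' := by injection hrest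
    have ht : t = 'o' :: 'y' :: rest := by injection hrest with _ h2
    subst hc; subst ht
    rw [rrep, grec, if_pos hp, if_pos hp]
    simp only [List.drop] at ih ⊢
    simp at ih ⊢
    omega
  | case3 c t hp ih =>
    rw [rrep, grec, if_neg hp, if_neg hp]
    simp [List.count_cons]
    push_cast at ih ⊢
    omega

-- positional occurrence count equals the greedy count ("boy" occurrences cannot overlap)
theorem countP_stable (l : List Char) (m n : Nat) (hm : l.length ≤ m + 2) (hmn : m ≤ n) :
    (List.range n).countP (fun k => decide (['b','o','y'] <+: l.drop k))
      = (List.range m).countP (fun k => decide (['b','o','y'] <+: l.drop k)) := by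
  obtain ⟨d, rfl⟩ : ∃ d, n = m + d := ⟨n - m, by omega⟩
  rw [List.range_add, List.countP_append]
  have : (List.map (m + ·) (List.range d)).countP
      (fun k => decide (['b','o','y'] <+: l.drop k)) = 0 := by
    rw [List.countP_eq_zero]
    intro k hk
    simp only [List.mem_map] at hk
    obtain ⟨j, _, rfl⟩ := hk
    simp only [decide_eq_true_eq]
    intro hpre
    have := hpre.length_le
    simp at this
    omega
  omega

theorem countP_len_eq_grec (l : List Char) :
    (List.range l.length).countP (fun k => decide (['b','o','y'] <+: l.drop k)) = grec l := by
  induction l using grec.induct with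
  | case1 =>
    simp only [List.length_nil, List.range_zero, List.countP_nil, grec]
  | case2 c t hp ih =>
    obtain ⟨rest, hrest⟩ : ∃ rest, c :: t = 'b' :: 'o' :: 'y' :: rest := by
      obtain ⟨s, hs⟩ := List.isPrefixOf_iff_prefix.mp hp
      exact ⟨s, hs.symm⟩
    have hc : c = 'b' := by injection hrest
    have ht : t = 'o' :: 'y' :: rest := by injection hrest with _ h2
    subst hc; subst ht
    simp only [List.drop_succ_cons, List.drop_zero] at ih
    rw [grec, if_pos hp]
    have unroll : ∀ (a : Char) (u : List Char),
        (List.range (a :: u).length).countP (fun k => decide (['b','o','y'] <+: (a :: u).drop k))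
        = (if ['b','o','y'] <+: (a :: u) then 1 else 0)
          + (List.range u.length).countP (fun k => decide (['b','o','y'] <+: u.drop k)) := by
      intro a u
      rw [List.length_cons, List.range_succ_eq_map, List.countP_cons, List.countP_map]
      have : (List.range u.length).countP
          ((fun k => decide (['b','o','y'] <+: (a :: u).drop k)) ∘ Nat.succ)
          = (List.range u.length).countP (fun k => decide (['b','o','y'] <+: u.drop k)) := by
        apply List.countP_congr
        intro k _
        simp [Function.comp]
      rw [this]
      by_cases h : ['b','o','y'] <+: a :: u
      · simp [h, Nat.add_comm]
      · simp [h]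
    rw [unroll, unroll, unroll]
    have hb : ['b','o','y'] <+: 'b' :: 'o' :: 'y' :: rest := List.isPrefixOf_iff_prefix.mp hp
    have ho : ¬ ['b','o','y'] <+: 'o' :: 'y' :: rest := by simp [List.cons_prefix_cons]
    have hy : ¬ ['b','o','y'] <+: 'y' :: rest := by simp [List.cons_prefix_cons]
    simp [hb, ho, hy]
    rw [Nat.add_comm]
    congr 1
  | case3 c t hp ih =>
    rw [grec, if_neg hp]
    rw [List.length_cons, List.range_succ_eq_map, List.countP_cons, List.countP_map]
    have e1 : (List.range t.length).countP
        ((fun k => decide (['b','o','y'] <+: (c :: t).drop k)) ∘ Nat.succ)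
        = (List.range t.length).countP (fun k => decide (['b','o','y'] <+: t.drop k)) := by
      apply List.countP_congr
      intro k _
      simp [Function.comp]
    have h0 : (decide (['b','o','y'] <+: (c :: t).drop 0) : Bool) = false := by
      simp only [List.drop_zero, decide_eq_false_iff_not]
      intro hpre
      exact hp (List.isPrefixOf_iff_prefix.mpr hpre)
    rw [e1, ih, h0]
    simp

theorem countP_drop_eq_grec : ∀ (l : List Char) (n : Nat), l.length ≤ n + 2 →
    (List.range n).countP (fun k => decide (['b','o','y'] <+: l.drop k)) = grec l := by
  intro l n hn
  have h1 := countP_stable l n (max n l.length) hn (Nat.le_max_left _ _)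
  have h2 := countP_stable l l.length (max n l.length) (by omega) (Nat.le_max_right _ _)
  rw [← h1, h2, countP_len_eq_grec]

-- the membership loop over indices counts the b/o/y characters
theorem countP_get_eq (l : List Char) :
    (List.range l.length).countP
      (fun k => decide (l[k]? = some 'b' ∨ l[k]? = some 'o' ∨ l[k]? = some 'y'))
      = l.countP (fun ch => decide (ch = 'b' ∨ ch = 'o' ∨ ch = 'y')) := by
  induction l with
  | nil => simp
  | cons c t ih =>
    rw [List.length_cons, List.range_succ_eq_map, List.countP_cons, List.countP_map, List.countP_cons]
    have e1 : (List.range t.length).countP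
        ((fun k => decide ((c :: t)[k]? = some 'b' ∨ (c :: t)[k]? = some 'o' ∨ (c :: t)[k]? = some 'y')) ∘ Nat.succ)
        = (List.range t.length).countP
          (fun k => decide (t[k]? = some 'b' ∨ t[k]? = some 'o' ∨ t[k]? = some 'y')) := by
      apply List.countP_congr
      intro k _
      simp [Function.comp]
    rw [e1, ih]
    simp

theorem countP_boy_chars (l : List Char) :
    (l.countP (fun ch => decide (ch = 'b' ∨ ch = 'o' ∨ ch = 'y')) : Int)
      = (l.count 'b' : Int) + l.count 'o' + l.count 'y' := by
  induction l with
  | nil => simp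
  | cons c t ih =>
    rw [List.countP_cons]
    simp only [Bool.decide_or] at ih ⊢
    simp only [List.count_cons]
    by_cases hb : c = 'b'
    · subst hb; simp; omega
    · by_cases ho : c = 'o'
      · subst ho; simp; omega
      · by_cases hy : c = 'y'
        · subst hy; simp; omega
        · simp [hb, ho, hy]; omega

-- ===== VERDICT (by name: the statement is the Claim_ definition above) =====
theorem boy_eq_boy_toList (s : String) : (s = "boy") ↔ s.toList = ['b','o','y'] := by
  constructor
  · intro h; subst h; rfl
  · intro h; exact String.toList_inj.mp (by rw [h]; rfl)

theorem boy_spec : Claim_equal_boy := by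
  intro str _
  unfold Spec_boy boy boy_alt
  simp only []
  -- the list of code points
  have hLen : str.length = str.toList.length := by simp
  -- PART 1: the first loop counts the (non-overlapping) "boy" occurrences
  have h1 : (PySem.List.pyRange 0 ((str.length : Int) - 2) 1).foldl
      (fun res i =>
        if PySem.Str.slice str (some i) (some (i + 3)) = "boy" then res + 1 else res) (0 : Int)
      = (grec str.toList : Int) := by
    rw [PySem.List.foldl_ite_add_one]
    rw [PySem.List.pyRange_one]
    rw [List.countP_map]
    have hc : (List.range (((str.length : Int) - 2) - 0).toNat).countP
        ((fun i => decide (PySem.Str.slice str (some i) (some (i + 3)) = "boy")) ∘ (fun k : Nat => (0 : Int) + k))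
        = (List.range (((str.length : Int) - 2) - 0).toNat).countP
          (fun k => decide (['b','o','y'] <+: str.toList.drop k)) := by
      apply List.countP_congr
      intro k _
      simp only [Function.comp, zero_add, decide_eq_true_eq]
      have hslice : (PySem.Str.slice str (some (k : Int)) (some ((k : Int) + 3))).toList
          = (str.toList.drop k).take 3 := by
        rw [PySem.Str.toList_slice, PySem.Chars.slice_eq_listSlice]
        rw [PySem.List.slice_toNat _ (by positivity) (by positivity)]
        congr 1
        omega
      rw [boy_eq_boy_toList, hslice]
      constructor
      · intro h
        rw [List.prefix_iff_eq_take]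
        exact h.symm
      · intro h
        rw [List.prefix_iff_eq_take] at h
        exact h.symm
    rw [hc]
    rw [countP_drop_eq_grec str.toList _ (by omega)]
    simp
  rw [h1]
  -- PART 2: the replaced string
  have h2 : (PySem.Str.replace str "boy" "nnn").toList = rrep str.toList := by
    rw [PySem.Str.replace]
    simp only [String.toList_ofList]
    show PySem.Chars.replace str.toList ['b','o','y'] ['n','n','n'] = rrep str.toList
    rw [PySem.Chars.replace]
    rw [if_neg (by simp)]
    rw [replacego_boy _ _ _ (le_refl _)]
    rfl
  -- PART 3: the second loop adds the number of leftover b/o/y characters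
  have h3 : ∀ (s2 : String) (a : Int), (PySem.List.pyRange 0 (s2.length : Int) 1).foldl
      (fun res i =>
        if PySem.Str.pyGet? s2 i = some 'b' ∨ PySem.Str.pyGet? s2 i = some 'o' ∨
           PySem.Str.pyGet? s2 i = some 'y' then res + 1 else res) a
      = a + (s2.toList.countP (fun ch => decide (ch = 'b' ∨ ch = 'o' ∨ ch = 'y')) : Int) := by
    intro s2 a
    rw [PySem.List.foldl_ite_add_one]
    rw [PySem.List.pyRange_one]
    rw [List.countP_map]
    have hrange : (((s2.length : Int)) - 0).toNat = s2.toList.length := by simp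
    rw [hrange]
    have hcongr : (List.range s2.toList.length).countP
        ((fun i => decide (PySem.Str.pyGet? s2 i = some 'b' ∨ PySem.Str.pyGet? s2 i = some 'o' ∨
            PySem.Str.pyGet? s2 i = some 'y')) ∘ (fun k : Nat => (0 : Int) + k))
        = (List.range s2.toList.length).countP
          (fun k => decide (s2.toList[k]? = some 'b' ∨ s2.toList[k]? = some 'o' ∨ s2.toList[k]? = some 'y')) := by
      apply List.countP_congr
      intro k _
      simp [Function.comp]
    rw [hcongr, countP_get_eq]
  rw [h3]
  -- PART 4: B's counts are plain character counts and the greedy "boy" count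
  have hb : (PySem.Str.count str "b" : Int) = (str.toList.count 'b' : Int) := by
    rw [PySem.Str.count]
    show ((PySem.Chars.count str.toList ['b'] : Nat) : Int) = _
    rw [PySem.Chars.count, if_neg (by simp)]
    rw [countgo_single 'b' _ _ _ (le_refl _)]
    simp
  have ho : (PySem.Str.count str "o" : Int) = (str.toList.count 'o' : Int) := by
    rw [PySem.Str.count]
    show ((PySem.Chars.count str.toList ['o'] : Nat) : Int) = _
    rw [PySem.Chars.count, if_neg (by simp)]
    rw [countgo_single 'o' _ _ _ (le_refl _)]
    simp
  have hy : (PySem.Str.count str "y" : Int) = (str.toList.count 'y' : Int) := by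
    rw [PySem.Str.count]
    show ((PySem.Chars.count str.toList ['y'] : Nat) : Int) = _
    rw [PySem.Chars.count, if_neg (by simp)]
    rw [countgo_single 'y' _ _ _ (le_refl _)]
    simp
  have hboy : (PySem.Str.count str "boy" : Int) = (grec str.toList : Int) := by
    rw [PySem.Str.count]
    show ((PySem.Chars.count str.toList ['b','o','y'] : Nat) : Int) = _
    rw [PySem.Chars.count, if_neg (by simp)]
    rw [countgo_boy _ _ _ (le_refl _)]
    simp
  rw [hb, ho, hy, hboy, h2]
  -- PART 5: arithmetic
  have hcount := count_rrep str.toList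
  have hchars := countP_boy_chars (rrep str.toList)
  omega
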